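-- pv_equiv track=rewrite | github.com/yasuo626/QuickPanda | data_analysis/src/utils.py | in_dict_lists
-- ===== SOURCE A (Python) =====
-- def in_dict_lists(dict:dict=None,value=None):
--     if dict is None:
--         return None
--     is_in,idx,key=False,-1,None
--     if value:
--         for k in dict.keys():
--             if value in dict[k]:
--                 key=k
--                 is_in=True
--                 idx=dict[k].index(value)
--     return is_in,key,idx
-- ===== SOURCE B (Python) =====
-- def in_dict_lists(dict=None, value=None):
--     # Reverse scan with early return: last forward match == first reverse match.
--     if dict is None:
--         return None
--     if value:
--         for k, row in reversed(list(dict.items())):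
--             if value in row:
--                 return True, k, row.index(value)
--     return False, None, -1
-- ===== Notes on version B (the rewrite author's own statement) =====
-- stated objective: alternative
-- what changed: B scans the keys in reverse and returns on the first hit (last forward match = first reverse match), instead of A's full forward pass that keeps overwriting its accumulator.
-- outside the precondition, e.g. on in_dict_lists(None, 1): A returns None, B returns None
import Mathlib
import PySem

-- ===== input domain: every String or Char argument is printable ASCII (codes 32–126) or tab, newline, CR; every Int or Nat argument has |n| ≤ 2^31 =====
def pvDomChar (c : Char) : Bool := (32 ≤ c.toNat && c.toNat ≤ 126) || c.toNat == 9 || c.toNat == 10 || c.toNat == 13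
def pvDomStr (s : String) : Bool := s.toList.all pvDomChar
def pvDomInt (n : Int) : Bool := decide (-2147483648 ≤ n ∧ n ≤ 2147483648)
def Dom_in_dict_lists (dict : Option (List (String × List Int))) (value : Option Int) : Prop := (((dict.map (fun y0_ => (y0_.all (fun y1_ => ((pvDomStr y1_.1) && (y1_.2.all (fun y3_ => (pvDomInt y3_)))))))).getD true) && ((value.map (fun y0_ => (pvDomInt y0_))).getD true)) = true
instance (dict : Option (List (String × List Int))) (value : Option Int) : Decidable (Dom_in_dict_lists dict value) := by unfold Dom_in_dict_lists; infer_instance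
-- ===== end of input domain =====

-- B replaces A's full forward pass (accumulator overwritten at every match) by a reverse
-- scan with early return on the first hit; return value only, same results on Pre_.

-- ===== PORT A =====
-- A's loop: for k in dict.keys(): if value in dict[k]: overwrite (is_in, key, idx).
-- dict[k].index(value) is guarded by membership, so index? is some; getD (-1) is unreachable.
def in_dict_lists (dict : Option (List (String × List Int))) (value : Option Int) : Bool × Option String × Int :=
  match dict with
  | none => (false, none, -1)   -- Python returns None here; excluded by Pre_
  | some l =>
    let d := PySem.Dict.ofList l
    -- `if value:` — truthy iff value is a nonzero int
    if (value.getD 0) ≠ 0 then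
      let v := value.getD 0
      d.items.foldl
        (fun (st : Bool × Option String × Int) kv =>
          if v ∈ kv.2 then (true, some kv.1, ((PySem.List.index? kv.2 v).map Int.ofNat).getD (-1))
          else st)
        (false, none, -1)
    else (false, none, -1)

-- ===== PORT B =====
-- B's loop body: first (k,row) of the reversed items with value ∈ row returns immediately.
def pvScanRev (v : Int) : List (String × List Int) → Bool × Option String × Int
  | [] => (false, none, -1)
  | (k, row) :: rest =>
      if v ∈ row then (true, some k, ((PySem.List.index? row v).map Int.ofNat).getD (-1))
      else pvScanRev v rest

def in_dict_lists_alt (dict : Option (List (String × List Int))) (value : Option Int) : Bool × Option String × Int :=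
  match dict with
  | none => (false, none, -1)   -- Python returns None here; excluded by Pre_
  | some l =>
    let d := PySem.Dict.ofList l
    if (value.getD 0) ≠ 0 then
      pvScanRev (value.getD 0) d.items.reverse
    else (false, none, -1)

-- ===== PRECONDITION & SPEC =====
-- Pre_ excludes dict = None, where the Python returns None instead of a (bool, key, idx) tuple.
def Pre_in_dict_lists (dict : Option (List (String × List Int))) (_value : Option Int) : Prop := dict ≠ none
instance (dict : Option (List (String × List Int))) (value : Option Int) : Decidable (Pre_in_dict_lists dict value) := by unfold Pre_in_dict_lists; infer_instance
def pvWitness_in_dict_lists : (Option (List (String × List Int))) × Option Int := (some [("a", [2, 1])], some 1)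

def Spec_in_dict_lists (dict : Option (List (String × List Int))) (value : Option Int) (out : Bool × Option String × Int) : Prop := out = in_dict_lists_alt dict value
instance (dict : Option (List (String × List Int))) (value : Option Int) (out : Bool × Option String × Int) : Decidable (Spec_in_dict_lists dict value out) := by unfold Spec_in_dict_lists; infer_instance

-- ===== CLAIM (what is proved, stated in full; the proofs are below) =====
def Claim_equal_in_dict_lists : Prop := ∀ (dict : Option (List (String × List Int))) (value : Option Int), Dom_in_dict_lists dict value → Pre_in_dict_lists dict value → Spec_in_dict_lists dict value (in_dict_lists dict value)

-- ===== LEMMAS AND PROOFS =====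

-- A's left fold keeps the LAST match; B's reverse scan returns the FIRST match of the
-- reversed list: they coincide, by induction from the right end of the list.
theorem foldl_eq_scanRev (v : Int) (l : List (String × List Int)) :
    l.foldl
      (fun (st : Bool × Option String × Int) kv =>
        if v ∈ kv.2 then (true, some kv.1, ((PySem.List.index? kv.2 v).map Int.ofNat).getD (-1))
        else st)
      (false, none, -1) = pvScanRev v l.reverse := by
  induction l using List.reverseRecOn with
  | nil => simp [pvScanRev]
  | append_singleton l x ih =>
    rw [List.foldl_append, List.reverse_append]
    simp only [List.foldl_cons, List.foldl_nil, List.reverse_cons, List.reverse_nil,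
      List.nil_append, List.singleton_append]
    obtain ⟨k, row⟩ := x
    simp only [PySem.List.index?_eq_idxOf?] at ih
    by_cases h : v ∈ row <;> simp [pvScanRev, h, ih]

theorem in_dict_lists_spec : Claim_equal_in_dict_lists := by
  intro dict value _ hpre
  unfold Spec_in_dict_lists in_dict_lists in_dict_lists_alt
  match dict with
  | none => exact absurd rfl hpre
  | some l =>
    simp only
    split_ifs with h
    · exact foldl_eq_scanRev _ _
    · rfl
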